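-- pv_equiv track=rewrite | github.com/swekshajha12/DissIt | Interview/cisco/selling_apples_by_count.py | max_apples
-- ===== SOURCE A (Python) =====
-- def max_apples(K, N, apple_sizes):
--     apple_sizes.sort()  # Sort the apple sizes in ascending order
--     max_apples_count = 0
--
--     for i in range(N):
--         for j in range(i, N):
--             if apple_sizes[j] - apple_sizes[i] <= K:
--                 # If the difference between the largest and smallest apple is within the range K
--                 max_apples_count = max(max_apples_count, j - i + 1)
--
--     return max_apples_count
-- ===== SOURCE B (Python) =====
-- def max_apples(K, N, apple_sizes):
--     apple_sizes.sort()  # same in-place sort as the original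
--     best = 0
--     for i in range(N):
--         # binary search: first index in [i, N) whose size exceeds apple_sizes[i] + K
--         limit = apple_sizes[i] + K
--         lo, hi = i, N
--         while lo < hi:
--             mid = (lo + hi) // 2
--             if apple_sizes[mid] <= limit:
--                 lo = mid + 1
--             else:
--                 hi = mid
--         best = max(best, lo - i)
--     return best
-- ===== Notes on version B (the rewrite author's own statement) =====
-- stated objective: faster
-- what changed: The inner linear scan over j is replaced by a binary search for the first apple larger than apple_sizes[i]+K in the sorted prefix, so each i costs O(log N) instead of O(N).
import Mathlib
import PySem

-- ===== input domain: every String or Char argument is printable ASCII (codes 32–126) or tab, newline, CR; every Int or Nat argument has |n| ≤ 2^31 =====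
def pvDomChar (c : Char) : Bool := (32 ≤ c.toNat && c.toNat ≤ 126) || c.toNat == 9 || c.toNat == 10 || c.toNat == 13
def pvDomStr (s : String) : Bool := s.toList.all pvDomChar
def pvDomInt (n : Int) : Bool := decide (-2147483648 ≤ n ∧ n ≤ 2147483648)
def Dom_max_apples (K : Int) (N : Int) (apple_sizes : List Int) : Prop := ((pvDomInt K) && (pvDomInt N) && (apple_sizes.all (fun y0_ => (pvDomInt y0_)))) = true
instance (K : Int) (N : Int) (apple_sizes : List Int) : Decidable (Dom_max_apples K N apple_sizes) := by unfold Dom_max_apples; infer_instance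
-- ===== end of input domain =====

-- B replaces A's inner linear scan by a binary search in the sorted prefix (O(N log N) vs O(N^2));
-- both A and B sort `apple_sizes` in place — the theorems below are about the return value.

-- ===== PORT A =====
def max_apples (K : Int) (N : Int) (apple_sizes : List Int) : Int :=
  let s := PySem.List.sorted apple_sizes (fun x => x)
  (PySem.List.pyRange 0 N 1).foldl (fun acc i =>
    (PySem.List.pyRange i N 1).foldl (fun acc2 j =>
      if PySem.List.pyGetD s j 0 - PySem.List.pyGetD s i 0 ≤ K then max acc2 (j - i + 1) else acc2)
      acc) 0

-- ===== PORT B =====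
-- hand-rolled bisect loop, exactly Source B's while loop (lo, hi as Int; (lo+hi)//2 is Python floordiv)
def pvBisect (s : List Int) (limit : Int) (lo hi : Int) : Int :=
  if h : lo < hi then
    let mid := PySem.Int.floordiv (lo + hi) 2
    if PySem.List.pyGetD s mid 0 ≤ limit then pvBisect s limit (mid + 1) hi
    else pvBisect s limit lo mid
  else lo
termination_by (hi - lo).toNat
decreasing_by
  · have := PySem.Int.floordiv_eq_ediv_of_pos (a := lo + hi) (b := 2) (by norm_num)
    simp only [mid] at *; omega
  · have := PySem.Int.floordiv_eq_ediv_of_pos (a := lo + hi) (b := 2) (by norm_num)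
    simp only [mid] at *; omega

def max_apples_alt (K : Int) (N : Int) (apple_sizes : List Int) : Int :=
  let s := PySem.List.sorted apple_sizes (fun x => x)
  (PySem.List.pyRange 0 N 1).foldl (fun best i =>
    let limit := PySem.List.pyGetD s i 0 + K
    let lo := pvBisect s limit i N
    max best (lo - i)) 0

-- ===== PRECONDITION & SPEC =====
-- A raises IndexError iff N > len(apple_sizes) (it reads apple_sizes[j] for every j < N); only those inputs are excluded.
def Pre_max_apples (K : Int) (N : Int) (apple_sizes : List Int) : Prop :=
  N ≤ (apple_sizes.length : Int)
instance (K : Int) (N : Int) (apple_sizes : List Int) : Decidable (Pre_max_apples K N apple_sizes) := by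
  unfold Pre_max_apples; infer_instance

def pvWitness_max_apples : Int × Int × List Int := (1, 3, [4, 1, 2])

def Spec_max_apples (K : Int) (N : Int) (apple_sizes : List Int) (out : Int) : Prop := out = max_apples_alt K N apple_sizes
instance (K : Int) (N : Int) (apple_sizes : List Int) (out : Int) : Decidable (Spec_max_apples K N apple_sizes out) := by unfold Spec_max_apples; infer_instance

-- ===== CLAIM (what is proved, stated in full; the proofs are below) =====
def Claim_equal_max_apples : Prop := ∀ (K : Int) (N : Int) (apple_sizes : List Int), Dom_max_apples K N apple_sizes → Pre_max_apples K N apple_sizes → Spec_max_apples K N apple_sizes (max_apples K N apple_sizes)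

-- ===== LEMMAS AND PROOFS =====

-- monotonicity of a sorted list, read through pyGetD
lemma pvGetD_mono {s : List Int} (hs : s.Pairwise (· ≤ ·))
    {a b : Int} (ha : 0 ≤ a) (hab : a ≤ b) (hb : b < (s.length : Int)) :
    PySem.List.pyGetD s a 0 ≤ PySem.List.pyGetD s b 0 := by
  rw [PySem.List.pyGetD_eq_getElem s 0 ha (by omega), PySem.List.pyGetD_eq_getElem s 0 (by omega) hb]
  rcases eq_or_lt_of_le hab with rfl | hlt
  · exact le_refl _
  · exact (List.pairwise_iff_getElem.mp hs) _ _ (by omega) (by omega) (by omega)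

-- correctness of the hand-rolled bisect loop on a sorted list
lemma pvBisect_spec (s : List Int) (limit : Int) (hs : s.Pairwise (· ≤ ·)) :
    ∀ (lo hi : Int), 0 ≤ lo → lo ≤ hi → hi ≤ (s.length : Int) →
      lo ≤ pvBisect s limit lo hi ∧ pvBisect s limit lo hi ≤ hi ∧
      (∀ j : Int, lo ≤ j → j < pvBisect s limit lo hi → PySem.List.pyGetD s j 0 ≤ limit) ∧
      (∀ j : Int, pvBisect s limit lo hi ≤ j → j < hi → limit < PySem.List.pyGetD s j 0) := by
  intro lo hi
  fun_induction pvBisect s limit lo hi with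
  | case1 lo hi h mid hmid ih =>
      intro h0 hlohi hhi
      have hb := PySem.Int.floordiv_two_mid_bounds (le_of_lt h)
      have hmid2 : mid < hi := by
        have := PySem.Int.floordiv_eq_ediv_of_pos (a := lo + hi) (b := 2) (by norm_num)
        simp only [mid] at *; omega
      obtain ⟨i1, i2, i3, i4⟩ := ih (by omega) (by omega) (by omega)
      refine ⟨by omega, i2, ?_, ?_⟩
      · intro j hj1 hj2
        by_cases hjm : j ≤ mid
        · exact le_trans (pvGetD_mono hs (by omega) hjm (by omega)) hmid
        · exact i3 j (by omega) hj2
      · intro j hj1 hj2; exact i4 j hj1 hj2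
  | case2 lo hi h mid hmid ih =>
      intro h0 hlohi hhi
      have hb := PySem.Int.floordiv_two_mid_bounds (le_of_lt h)
      have hmid2 : mid < hi := by
        have := PySem.Int.floordiv_eq_ediv_of_pos (a := lo + hi) (b := 2) (by norm_num)
        simp only [mid] at *; omega
      obtain ⟨i1, i2, i3, i4⟩ := ih (by omega) (by omega) (by omega)
      refine ⟨i1, by omega, i3, ?_⟩
      intro j hj1 hj2
      by_cases hjm : j < mid
      · exact i4 j hj1 hjm
      · exact lt_of_lt_of_le (lt_of_not_ge hmid) (pvGetD_mono hs (by omega) (by omega) (by omega))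
  | case3 lo hi h =>
      intro h0 hlohi hhi
      exact ⟨le_refl _, by omega, by omega, by omega⟩

-- A's inner loop computed in closed form from the bisect point r
lemma pvInner (s : List Int) (K N i r : Int) (hrN : r ≤ N)
    (hlt : ∀ j : Int, i ≤ j → j < r → PySem.List.pyGetD s j 0 ≤ PySem.List.pyGetD s i 0 + K)
    (hge : ∀ j : Int, r ≤ j → j < N → PySem.List.pyGetD s i 0 + K < PySem.List.pyGetD s j 0) :
    ∀ (a acc : Int), i ≤ a →
      (PySem.List.pyRange a N 1).foldl (fun acc2 j =>
        if PySem.List.pyGetD s j 0 - PySem.List.pyGetD s i 0 ≤ K then max acc2 (j - i + 1) else acc2) acc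
      = if a < r then max acc (r - i) else acc := by
  suffices H : ∀ (fuel : Nat) (a acc : Int), i ≤ a → (N - a).toNat = fuel →
      (PySem.List.pyRange a N 1).foldl (fun acc2 j =>
        if PySem.List.pyGetD s j 0 - PySem.List.pyGetD s i 0 ≤ K then max acc2 (j - i + 1) else acc2) acc
      = if a < r then max acc (r - i) else acc by
    intro a acc ha; exact H _ a acc ha rfl
  intro fuel
  induction fuel using Nat.strong_induction_on with
  | _ fuel ih =>
    intro a acc ha hf
    by_cases haN : a < N
    · rw [PySem.List.pyRange_one_cons haN]
      simp only [List.foldl_cons]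
      by_cases har : a < r
      · have hcond : PySem.List.pyGetD s a 0 - PySem.List.pyGetD s i 0 ≤ K := by
          have := hlt a ha har; omega
        rw [if_pos hcond,
          ih ((N - (a + 1)).toNat) (by omega) (a + 1) (max acc (a - i + 1)) (by omega) rfl]
        by_cases h2 : a + 1 < r
        · rw [if_pos h2, if_pos har]; omega
        · rw [if_neg h2, if_pos har]
          have : r - i = a - i + 1 := by omega
          rw [this]
      · have hcond : ¬ (PySem.List.pyGetD s a 0 - PySem.List.pyGetD s i 0 ≤ K) := by
          have := hge a (le_of_not_gt har) haN; omega
        rw [if_neg hcond,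
          ih ((N - (a + 1)).toNat) (by omega) (a + 1) acc (by omega) rfl,
          if_neg (by omega), if_neg har]
    · rw [PySem.List.pyRange_one_eq_nil (by omega)]
      simp only [List.foldl_nil]
      rw [if_neg (by omega)]

-- fold two functions over the same list, equal step-by-step under a nonnegativity invariant
lemma pvFoldlCongrNonneg (l : List Int) (fA fB : Int → Int → Int)
    (hB : ∀ acc x, 0 ≤ acc → x ∈ l → 0 ≤ fB acc x)
    (heq : ∀ acc x, 0 ≤ acc → x ∈ l → fA acc x = fB acc x) :
    ∀ acc : Int, 0 ≤ acc → l.foldl fA acc = l.foldl fB acc := by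
  induction l with
  | nil => intro acc _; rfl
  | cons x t ih =>
      intro acc hacc
      simp only [List.foldl_cons]
      rw [heq acc x hacc (by simp)]
      exact ih (fun a y ha hy => hB a y ha (by simp [hy]))
        (fun a y ha hy => heq a y ha (by simp [hy])) _ (hB acc x hacc (by simp))

-- ===== VERDICT (by name: the statement is the Claim_ definition above) =====
theorem max_apples_spec : Claim_equal_max_apples := by
  intro K N apple_sizes _ hpre
  unfold Pre_max_apples at hpre
  unfold Spec_max_apples max_apples max_apples_alt
  have hsort : (PySem.List.sorted apple_sizes (fun x => x)).Pairwise (· ≤ ·) :=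
    PySem.List.sorted_pairwise apple_sizes (fun x => x)
  have hlen : ((PySem.List.sorted apple_sizes (fun x => x)).length : Int) = (apple_sizes.length : Int) := by
    rw [PySem.List.length_sorted]
  refine pvFoldlCongrNonneg _ _ _ ?_ ?_ 0 (le_refl 0)
  · intro acc i hacc hi
    have hiN := (PySem.List.mem_pyRange_one.mp hi)
    obtain ⟨r1, r2, r3, r4⟩ := pvBisect_spec (PySem.List.sorted apple_sizes (fun x => x))
      (PySem.List.pyGetD (PySem.List.sorted apple_sizes (fun x => x)) i 0 + K) hsort i N
      (by omega) (by omega) (by omega)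
    simp only
    omega
  · intro acc i hacc hi
    have hiN := (PySem.List.mem_pyRange_one.mp hi)
    obtain ⟨r1, r2, r3, r4⟩ := pvBisect_spec (PySem.List.sorted apple_sizes (fun x => x))
      (PySem.List.pyGetD (PySem.List.sorted apple_sizes (fun x => x)) i 0 + K) hsort i N
      (by omega) (by omega) (by omega)
    simp only
    rw [pvInner (PySem.List.sorted apple_sizes (fun x => x)) K N i
      (pvBisect (PySem.List.sorted apple_sizes (fun x => x))
        (PySem.List.pyGetD (PySem.List.sorted apple_sizes (fun x => x)) i 0 + K) i N)
      r2 (by intro j hj1 hj2; have := r3 j hj1 hj2; omega)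
      (by intro j hj1 hj2; exact r4 j hj1 hj2) i acc (le_refl i)]
    omega
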